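-- pv_equiv track=rewrite | github.com/koizo/algoexpert | arrays/best_seat.py | bestSeat
-- ===== SOURCE A (Python) =====
-- def bestSeat(seats):
--     # Write your code here.
--     head, tail = 0, 0
--     best_seats = 0
--     current_seats = 0
--     for i in range(len(seats)):
--         if seats[i] == 1:
--             if current_seats > best_seats:
--                 best_seats = current_seats
--                 tail = i
--             current_seats = 0
--             continue
--         current_seats += 1
--
--     if best_seats == 0:
--         return -1
--
--     location = best_seats // 2
--
--     return tail - location - 1
-- ===== SOURCE B (Python) =====
-- def bestSeat(seats):
--     # Index-based: collect occupied-seat indices (with -1 as the left boundary),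
--     # then scan consecutive pairs for the leftmost widest gap; the gap after the
--     # last occupied seat is never formed, matching the task's behaviour.
--     ones = [-1] + [i for i, s in enumerate(seats) if s == 1]
--     best_gap, best_cur = 0, 0
--     for prev, cur in zip(ones, ones[1:]):
--         gap = cur - prev - 1
--         if gap > best_gap:
--             best_gap, best_cur = gap, cur
--     if best_gap == 0:
--         return -1
--     return best_cur - best_gap // 2 - 1
-- ===== Notes on version B (the rewrite author's own statement) =====
-- stated objective: alternative
-- what changed: Replaces A's single index-driven scan with mutable run-length counters by an occupied-index list (with a -1 left boundary) and a consecutive-pair scan over it computing gaps arithmetically.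
import Mathlib
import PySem

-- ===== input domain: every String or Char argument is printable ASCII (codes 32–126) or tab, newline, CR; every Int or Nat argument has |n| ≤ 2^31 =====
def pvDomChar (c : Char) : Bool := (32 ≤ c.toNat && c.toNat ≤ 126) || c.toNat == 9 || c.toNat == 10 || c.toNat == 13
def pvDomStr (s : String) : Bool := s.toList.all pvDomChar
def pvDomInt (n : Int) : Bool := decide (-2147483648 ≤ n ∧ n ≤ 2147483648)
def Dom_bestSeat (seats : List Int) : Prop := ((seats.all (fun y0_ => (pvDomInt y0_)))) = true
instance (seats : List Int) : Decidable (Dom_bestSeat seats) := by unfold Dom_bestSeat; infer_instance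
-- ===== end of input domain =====

-- B rewrites A's run-length scan as a gap scan over the list of occupied indices; same O(n) cost (objective: alternative).

-- ===== PORT A =====
-- state = (tail, best_seats, current_seats); 'head' of the Python is never used and carries no state.
def bestSeat (seats : List Int) : Int :=
  let st := (PySem.List.pyRange 0 (PySem.List.len seats) 1).foldl
    (fun (st : Int × Int × Int) i =>
      if PySem.List.pyGetD seats i 0 = 1 then
        if st.2.2 > st.2.1 then (i, st.2.2, 0) else (st.1, st.2.1, 0)
      else (st.1, st.2.1, st.2.2 + 1)) (0, 0, 0)
  if st.2.1 = 0 then -1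
  else st.1 - PySem.Int.floordiv st.2.1 2 - 1

-- ===== PORT B =====
-- state = (best_gap, best_cur); ones = -1 :: occupied indices; loop over zip(ones, ones[1:]).
def bestSeat_alt (seats : List Int) : Int :=
  let ones : List Int :=
    (-1) :: (PySem.List.enumerate seats 0).filterMap (fun p => if p.2 = 1 then some p.1 else none)
  let st := (ones.zip ones.tail).foldl
    (fun (st : Int × Int) pc =>
      let gap := pc.2 - pc.1 - 1
      if gap > st.1 then (gap, pc.2) else st) (0, 0)
  if st.1 = 0 then -1
  else st.2 - PySem.Int.floordiv st.1 2 - 1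

-- ===== PRECONDITION & SPEC =====
def Spec_bestSeat (seats : List Int) (out : Int) : Prop := out = bestSeat_alt seats
instance (seats : List Int) (out : Int) : Decidable (Spec_bestSeat seats out) := by unfold Spec_bestSeat; infer_instance

-- ===== CLAIM (what is proved, stated in full; the proofs are below) =====
def Claim_equal_bestSeat : Prop := ∀ (seats : List Int), Dom_bestSeat seats → Spec_bestSeat seats (bestSeat seats)

-- ===== LEMMAS AND PROOFS =====

-- A's loop body, on (index, value) pairs.
def pvStepA (st : Int × Int × Int) (p : Int × Int) : Int × Int × Int :=
  if p.2 = 1 then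
    if st.2.2 > st.2.1 then (p.1, st.2.2, 0) else (st.1, st.2.1, 0)
  else (st.1, st.2.1, st.2.2 + 1)

-- B's pair loop, rephrased as a fold carrying the previous occupied index.
def pvGapScan : List Int → Int → Int × Int → Int × Int
  | [], _, st => st
  | c :: rest, prev, st =>
      pvGapScan rest c (if c - prev - 1 > st.1 then (c - prev - 1, c) else st)

def pvOnes (seats : List Int) (s : Int) : List Int :=
  (PySem.List.enumerate seats s).filterMap (fun p => if p.2 = 1 then some p.1 else none)

lemma pvZip_eq_gapScan (l : List Int) : ∀ (p : Int) (st : Int × Int),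
    ((p :: l).zip l).foldl
      (fun (st : Int × Int) pc =>
        let gap := pc.2 - pc.1 - 1
        if gap > st.1 then (gap, pc.2) else st) st = pvGapScan l p st := by
  induction l with
  | nil => intro p st; simp [pvGapScan]
  | cons c rest ih =>
      intro p st
      simp only [List.zip_cons_cons, List.foldl_cons, pvGapScan]
      exact ih c _

-- Main invariant: A's scan state and B's gap scan stay aligned
-- (prev = s - cur - 1; best = best_gap; tail = best_cur).
lemma pvInv (seats : List Int) : ∀ (s tail best cur : Int),
    ((PySem.List.enumerate seats s).foldl pvStepA (tail, best, cur)).1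
      = (pvGapScan (pvOnes seats s) (s - cur - 1) (best, tail)).2
  ∧ ((PySem.List.enumerate seats s).foldl pvStepA (tail, best, cur)).2.1
      = (pvGapScan (pvOnes seats s) (s - cur - 1) (best, tail)).1 := by
  induction seats with
  | nil => intro s tail best cur; simp [PySem.List.enumerate_nil, pvOnes, pvGapScan]
  | cons x xs ih =>
      intro s tail best cur
      simp only [pvOnes, PySem.List.enumerate_cons, List.filterMap_cons, List.foldl_cons]
      by_cases hx : x = 1
      · by_cases hc : cur > best
        · simpa [hx, pvStepA, pvGapScan, hc, pvOnes,
                 show s - (s - cur - 1) - 1 = cur by ring,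
                 show s + 1 - 0 - 1 = s by ring] using ih (s + 1) s cur 0
        · simpa [hx, pvStepA, pvGapScan, hc, pvOnes,
                 show s - (s - cur - 1) - 1 = cur by ring,
                 show s + 1 - 0 - 1 = s by ring] using ih (s + 1) tail best 0
      · simpa [hx, pvStepA, pvOnes,
               show s + 1 - (cur + 1) - 1 = s - cur - 1 by ring] using ih (s + 1) tail best (cur + 1)

-- Bridge A's fold over range(len(seats)) to a fold over enumerate(seats).
lemma pvA_enum (seats : List Int) :
    (PySem.List.pyRange 0 (PySem.List.len seats) 1).foldl
      (fun (st : Int × Int × Int) i =>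
        if PySem.List.pyGetD seats i 0 = 1 then
          if st.2.2 > st.2.1 then (i, st.2.2, 0) else (st.1, st.2.1, 0)
        else (st.1, st.2.1, st.2.2 + 1)) (0, 0, 0)
    = (PySem.List.enumerate seats 0).foldl pvStepA (0, 0, 0) := by
  rw [PySem.List.enumerate_eq_map_pyRange (d := 0), List.foldl_map]
  rfl

-- ===== VERDICT (by name: the statement is the Claim_ definition above) =====
theorem bestSeat_spec : Claim_equal_bestSeat := by
  intro seats _
  have h := pvInv seats 0 0 0 0
  norm_num [pvOnes] at h
  unfold Spec_bestSeat
  simp only [bestSeat, bestSeat_alt, pvA_enum, pvZip_eq_gapScan, List.tail_cons]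
  rw [h.1, h.2]
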